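-- pv_equiv track=rewrite | github.com/selavii/LimbajeFormale | LAB4/main.py | generate_sequences_from_regex
-- ===== SOURCE A (Python) =====
-- import itertools
--
-- def generate_sequences_from_regex(regex, limit=5):
--     sequences = ['']
--     i = 0
--     while i < len(regex):
--         if regex[i] == '(':
--             j = i
--             while regex[j] != ')':
--                 j += 1
--             group = regex[i + 1:j].split('|')
--             i = j + 1
--             if i < len(regex) and regex[i] in '*+?>':
--                 quantifier = regex[i]
--                 i += 1
--                 if quantifier == '*':
--                     group_seqs = ['']
--                     for n in range(1, limit + 1):
--                         for prod in itertools.product(group, repeat=n):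
--                             group_seqs.append(''.join(prod))
--                     sequences = [s + g for s in sequences for g in group_seqs]
--                 elif quantifier == '+':
--                     group_seqs = []
--                     for n in range(1, limit + 1):
--                         for prod in itertools.product(group, repeat=n):
--                             group_seqs.append(''.join(prod))
--                     sequences = [s + g for s in sequences for g in group_seqs]
--                 elif quantifier == '?':
--                     group_seqs = [''] + group
--                     sequences = [s + g for s in sequences for g in group_seqs]
--                 elif quantifier == '>':
--                     x = regex[i:].find('<')
--                     if x == -1:
--                         raise ValueError("No matching '<' for power expression.")
--                     power = int(regex[i:i + x])
--                     group_seqs = [c * power for c in group]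
--                     sequences = [s + g for s in sequences for g in group_seqs]
--                     i += x + 1
--             else:
--                 sequences = [s + g for s in sequences for g in group]
--         else:
--             if i < len(regex) - 1 and regex[i + 1:i + 2] in '*+?>':
--                 char = regex[i]
--                 quantifier = regex[i + 1]
--                 i += 2
--                 if quantifier == '*':
--                     sequences = [s + char * n for s in sequences for n in range(limit + 1)]
--                 elif quantifier == '+':
--                     sequences = [s + char * n for s in sequences for n in range(1, limit + 1)]
--                 elif quantifier == '?':
--                     sequences = [s + char * n for s in sequences for n in range(2)]
--                 elif quantifier == '>':
--                     x = regex[i:].find('<')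
--                     if x == -1:
--                         raise ValueError("No matching '<' for power expression.")
--                     power = int(regex[i:i + x])
--                     sequences = [s + char * power for s in sequences]
--                     i += 2
--             else:
--                 sequences = [s + regex[i] for s in sequences]
--                 i += 1
--     return sequences
-- ===== SOURCE B (Python) =====
-- def generate_sequences_from_regex(regex, limit=5):
--     # Back-to-front build: pass 1 records token start positions; pass 2 walks the
--     # tokens in reverse, building suffix products (no running prefix-product list).
--     n = len(regex)
--
--     def layer(group, k):
--         if k == 0:
--             return ['']
--         return [g + t for g in group for t in layer(group, k - 1)]
--
--     def powers(group):
--         return [s for k in range(1, limit + 1) for s in layer(group, k)]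
--
--     def token(i):
--         # parse ONE token starting at i: return (its option list, next token's index)
--         if regex[i] == '(':
--             j = i
--             while regex[j] != ')':
--                 j += 1
--             group = regex[i + 1:j].split('|')
--             i = j + 1
--             if i < n and regex[i] in '*+?>':
--                 q = regex[i]
--                 i += 1
--                 if q == '*':
--                     return [''] + powers(group), i
--                 if q == '+':
--                     return powers(group), i
--                 if q == '?':
--                     return [''] + group, i
--                 x = regex[i:].find('<')
--                 if x == -1:
--                     raise ValueError("No matching '<' for power expression.")
--                 power = int(regex[i:i + x])
--                 return [c * power for c in group], i + x + 1
--             return group, i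
--         ch = regex[i]
--         if i < n - 1 and regex[i + 1:i + 2] in '*+?>':
--             q = regex[i + 1]
--             i += 2
--             if q == '*':
--                 return [ch * k for k in range(limit + 1)], i
--             if q == '+':
--                 return [ch * k for k in range(1, limit + 1)], i
--             if q == '?':
--                 return [ch * k for k in range(2)], i
--             x = regex[i:].find('<')
--             if x == -1:
--                 raise ValueError("No matching '<' for power expression.")
--             power = int(regex[i:i + x])
--             return [ch * power], i + 2
--         return [ch], i + 1
--
--     starts = []
--     i = 0
--     while i < n:
--         starts.append(i)
--         _, i = token(i)
--     tails = ['']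
--     for i in reversed(starts):
--         opts, _ = token(i)
--         tails = [o + t for o in opts for t in tails]
--     return tails
-- ===== Notes on version B (the rewrite author's own statement) =====
-- stated objective: alternative
-- what changed: A makes one forward pass mutating a running prefix-product list at every token; B first scans the regex only to record token start positions, then walks those tokens in REVERSE, expanding each token on demand and building suffix products back-to-front (correct because the concatenation product is associative), with group powers computed by a recursive layer function instead of itertools.product.
import Mathlib
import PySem

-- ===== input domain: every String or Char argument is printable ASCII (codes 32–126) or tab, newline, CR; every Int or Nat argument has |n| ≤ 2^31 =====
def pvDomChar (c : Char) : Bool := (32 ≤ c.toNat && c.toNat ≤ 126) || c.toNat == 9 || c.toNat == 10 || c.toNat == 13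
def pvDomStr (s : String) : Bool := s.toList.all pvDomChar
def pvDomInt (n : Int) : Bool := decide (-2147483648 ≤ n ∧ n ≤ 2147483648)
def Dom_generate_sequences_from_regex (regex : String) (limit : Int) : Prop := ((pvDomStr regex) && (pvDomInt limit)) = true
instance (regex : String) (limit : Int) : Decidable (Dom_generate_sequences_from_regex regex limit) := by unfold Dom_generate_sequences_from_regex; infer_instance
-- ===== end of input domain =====

-- B replaces A's forward pass with a mutating prefix-product accumulator by a boundary scan that
-- records token start positions followed by a REVERSE walk building suffix products back-to-front
-- (objective: alternative construction order, same asymptotic cost).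

-- ===== shared helpers (used by both ports; each Python computes these same values) =====
-- regex[i] in '*+?>' (membership test of a single char)
def pvQuant (c : Char) : Bool := c == '*' || c == '+' || c == '?' || c == '>'
-- [s + g for s in xs for g in ys]
def pvCombine (xs ys : List String) : List String := xs.flatMap (fun s => ys.map (fun g => s ++ g))
-- Python string repetition s * n (n ≤ 0 gives '')
def pvRepStr (s : String) (n : Int) : String := String.ofList (PySem.List.pyRepeat s.toList n)
-- all n-fold concatenations of picks from g, first pick most significant
-- (A: ''.join(prod) over itertools.product(group, repeat=n); B: recursive layer)
def pvProdRep (g : List String) : Nat → List String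
  | 0 => [""]
  | n + 1 => g.flatMap (fun x => (pvProdRep g n).map (fun t => x ++ t))
-- concatenation of the layers for n = 1..limit
def pvPow (g : List String) (limit : Int) : List String :=
  (PySem.List.pyRange 1 (limit + 1) 1).flatMap (fun n => pvProdRep g n.toNat)
-- the scan `j = i; while regex[j] != ')': j += 1` and the two slices it yields:
-- some (regex[i+1:j], regex[j+1:]) , or none when the scan runs off the end (IndexError)
def pvSplitParen (cs : List Char) : Option (List Char × List Char) :=
  match cs.dropWhile (fun d => d != ')') with
  | [] => none
  | _ :: after => some (cs.takeWhile (fun d => d != ')'), after)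

-- ===== PORT A =====
-- A's while-loop over index i, as recursion on the remaining suffix `cs`, carrying `seqs`.
-- `fuel` only makes the recursion structural (each loop iteration consumes at least one character,
-- so fuel = |regex| never runs out); it changes no computed value.
-- Where Python raises (no ')' → IndexError; no '<' or failing int() → ValueError) the port stops and
-- returns the current list; those inputs are excluded by Pre_.
def pvArun (limit : Int) : Nat → List Char → List String → List String
  | 0, _, seqs => seqs
  | _, [], seqs => seqs
  | f + 1, c :: rest, seqs =>
    if c == '(' then
      match pvSplitParen rest with
      | none => seqs                      -- while regex[j] != ')' runs off the end: IndexError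
      | some (inside, after) =>
        match after with
        | q :: rest2 =>
          if q == '*' then pvArun limit f rest2 (pvCombine seqs ("" :: pvPow ((PySem.Chars.splitOn inside ['|']).map String.ofList) limit))
          else if q == '+' then pvArun limit f rest2 (pvCombine seqs (pvPow ((PySem.Chars.splitOn inside ['|']).map String.ofList) limit))
          else if q == '?' then pvArun limit f rest2 (pvCombine seqs ("" :: (PySem.Chars.splitOn inside ['|']).map String.ofList))
          else if q == '>' then
            if PySem.Chars.find rest2 ['<'] == -1 then seqs          -- raise ValueError
            else
              match PySem.Int.ofChars? (rest2.take (PySem.Chars.find rest2 ['<']).toNat) with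
              | none => seqs              -- int() raises ValueError
              | some power =>
                  pvArun limit f (rest2.drop ((PySem.Chars.find rest2 ['<']).toNat + 1))
                    (pvCombine seqs ((PySem.Chars.splitOn inside ['|']).map (fun l => pvRepStr (String.ofList l) power)))
          else pvArun limit f (q :: rest2) (pvCombine seqs ((PySem.Chars.splitOn inside ['|']).map String.ofList))
        | [] => pvCombine seqs ((PySem.Chars.splitOn inside ['|']).map String.ofList)      -- ')' was the last char: combine, loop ends
    else
      match rest with
      | q :: rest2 =>
        if pvQuant q then
          if q == '*' then
            pvArun limit f rest2
              (pvCombine seqs ((PySem.List.pyRange 0 (limit + 1) 1).map (fun n => pvRepStr (String.ofList [c]) n)))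
          else if q == '+' then
            pvArun limit f rest2
              (pvCombine seqs ((PySem.List.pyRange 1 (limit + 1) 1).map (fun n => pvRepStr (String.ofList [c]) n)))
          else if q == '?' then
            pvArun limit f rest2
              (pvCombine seqs ((PySem.List.pyRange 0 2 1).map (fun n => pvRepStr (String.ofList [c]) n)))
          else
            if PySem.Chars.find rest2 ['<'] == -1 then seqs          -- raise ValueError
            else
              match PySem.Int.ofChars? (rest2.take (PySem.Chars.find rest2 ['<']).toNat) with
              | none => seqs              -- int() raises ValueError
              | some power =>
                  -- note Python's i += 2 here (not x+1): only two chars of the power expression are skipped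
                  pvArun limit f (rest2.drop 2) (pvCombine seqs [pvRepStr (String.ofList [c]) power])
        else pvArun limit f (q :: rest2) (pvCombine seqs [String.ofList [c]])
      | [] => pvCombine seqs [String.ofList [c]]

def generate_sequences_from_regex (regex : String) (limit : Int) : List String :=
  pvArun limit regex.toList.length regex.toList [""]

-- ===== PORT B =====
-- Source B's token(i): parse ONE token at the given suffix; some (options, remaining suffix),
-- none exactly where the Python helper raises (no ')', no '<', or int() fails).
def pvToken (limit : Int) : List Char → Option (List String × List Char)
  | [] => none
  | c :: rest =>
    if c == '(' then
      match pvSplitParen rest with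
      | none => none
      | some (inside, after) =>
        let group := (PySem.Chars.splitOn inside ['|']).map String.ofList
        match after with
        | q :: rest2 =>
          if q == '*' then some ("" :: pvPow group limit, rest2)
          else if q == '+' then some (pvPow group limit, rest2)
          else if q == '?' then some ("" :: group, rest2)
          else if q == '>' then
            if PySem.Chars.find rest2 ['<'] == -1 then none
            else
              match PySem.Int.ofChars? (rest2.take (PySem.Chars.find rest2 ['<']).toNat) with
              | none => none
              | some power => some (group.map (fun g => pvRepStr g power), rest2.drop ((PySem.Chars.find rest2 ['<']).toNat + 1))
          else some (group, q :: rest2)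
        | [] => some (group, [])
    else
      match rest with
      | q :: rest2 =>
        if pvQuant q then
          if q == '*' then some ((PySem.List.pyRange 0 (limit + 1) 1).map (fun n => pvRepStr (String.ofList [c]) n), rest2)
          else if q == '+' then some ((PySem.List.pyRange 1 (limit + 1) 1).map (fun n => pvRepStr (String.ofList [c]) n), rest2)
          else if q == '?' then some ((PySem.List.pyRange 0 2 1).map (fun n => pvRepStr (String.ofList [c]) n), rest2)
          else
            if PySem.Chars.find rest2 ['<'] == -1 then none
            else
              match PySem.Int.ofChars? (rest2.take (PySem.Chars.find rest2 ['<']).toNat) with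
              | none => none
              | some power => some ([pvRepStr (String.ofList [c]) power], rest2.drop 2)
        else some ([String.ofList [c]], q :: rest2)
      | [] => some ([String.ofList [c]], [])

-- Source B's pass 1: the `starts` list (token start positions, here as the suffix at each start);
-- fuel = |regex| as in pvArun.
def pvStarts (limit : Int) : Nat → List Char → List (List Char)
  | 0, _ => []
  | _, [] => []
  | f + 1, c :: rest =>
    match pvToken limit (c :: rest) with
    | none => []
    | some (_, next) => (c :: rest) :: pvStarts limit f next

-- Source B's pass 2: walk the starts in reverse building suffix products
-- (`for i in reversed(starts): tails = [o + t …]` is this right fold; the none branch is a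
-- totality guard — pass 1 only records suffixes on which pvToken returns).
def generate_sequences_from_regex_alt (regex : String) (limit : Int) : List String :=
  (pvStarts limit regex.toList.length regex.toList).foldr
    (fun s tails => match pvToken limit s with
      | some (opts, _) => pvCombine opts tails
      | none => tails) [""]

-- ===== PRECONDITION & SPEC =====
-- Pre_ excludes exactly the regexes on which Python A raises: a '(' with no later ')' (IndexError),
-- or a '>' quantifier whose power expression lacks a closing '<' or is not an int literal (ValueError).
-- It is a token-shape well-formedness check of the regex only: it inspects no computed output,
-- does not depend on limit, and excludes no input A returns on. (The Nat argument is the character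
-- count of the string, which bounds the number of tokens; it only makes the recursion structural.)
def pvWF : Nat → List Char → Bool
  | 0, _ => true
  | _, [] => true
  | f + 1, c :: rest =>
    if c == '(' then
      match pvSplitParen rest with
      | none => false
      | some (_, after) =>
        match after with
        | q :: rest2 =>
          if q == '>' then
            PySem.Chars.find rest2 ['<'] != -1 &&
              (PySem.Int.ofChars? (rest2.take (PySem.Chars.find rest2 ['<']).toNat)).isSome &&
              pvWF f (rest2.drop ((PySem.Chars.find rest2 ['<']).toNat + 1))
          else if pvQuant q then pvWF f rest2
          else pvWF f (q :: rest2)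
        | [] => true
    else
      match rest with
      | q :: rest2 =>
        if q == '>' then
          PySem.Chars.find rest2 ['<'] != -1 &&
            (PySem.Int.ofChars? (rest2.take (PySem.Chars.find rest2 ['<']).toNat)).isSome &&
            pvWF f (rest2.drop 2)
        else if pvQuant q then pvWF f rest2
        else pvWF f (q :: rest2)
      | [] => true

def Pre_generate_sequences_from_regex (regex : String) (limit : Int) : Prop :=
  pvWF regex.toList.length regex.toList = true
instance (regex : String) (limit : Int) : Decidable (Pre_generate_sequences_from_regex regex limit) := by
  unfold Pre_generate_sequences_from_regex; infer_instance

def pvWitness_generate_sequences_from_regex : String × Int := ("(a|b)+c*d", 2)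

def Spec_generate_sequences_from_regex (regex : String) (limit : Int) (out : List String) : Prop := out = generate_sequences_from_regex_alt regex limit
instance (regex : String) (limit : Int) (out : List String) : Decidable (Spec_generate_sequences_from_regex regex limit out) := by unfold Spec_generate_sequences_from_regex; infer_instance

-- ===== CLAIM (what is proved, stated in full; the proofs are below) =====
def Claim_equal_generate_sequences_from_regex : Prop := ∀ (regex : String) (limit : Int), Dom_generate_sequences_from_regex regex limit → Pre_generate_sequences_from_regex regex limit → Spec_generate_sequences_from_regex regex limit (generate_sequences_from_regex regex limit)

-- ===== LEMMAS AND PROOFS =====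
-- pvCombine is a monoid action on the right: [""] is the identity and it is associative,
-- so A's prefix products and B's suffix products meet in the middle.
@[simp] lemma pvCombine_nil_right (xs : List String) : pvCombine xs [""] = xs := by
  simp [pvCombine]
@[simp] lemma pvCombine_nil_left (ys : List String) : pvCombine [""] ys = ys := by
  simp [pvCombine]
lemma pvCombine_assoc (xs ys zs : List String) :
    pvCombine (pvCombine xs ys) zs = pvCombine xs (pvCombine ys zs) := by
  induction xs with
  | nil => simp [pvCombine]
  | cons x xs ih =>
    simp only [pvCombine, List.flatMap_cons, List.flatMap_append] at *
    rw [ih]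
    congr 1
    simp only [List.flatMap_map, List.map_flatMap, List.map_map, Function.comp_def, String.append_assoc]

-- proof-only helpers: the option list of one token (the `opts` Source B's pass 2 recomputes),
-- and the segment list both programs implicitly share.
def pvOptsOf (limit : Int) (s : List Char) : List String :=
  match pvToken limit s with
  | some (o, _) => o
  | none => [""]

def pvSegs (limit : Int) : Nat → List Char → List (List String)
  | 0, _ => []
  | _, [] => []
  | f + 1, c :: rest =>
    match pvToken limit (c :: rest) with
    | none => []
    | some (o, next) => o :: pvSegs limit f next

lemma pvSegs_nil (limit : Int) (f : Nat) : pvSegs limit f [] = [] := by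
  cases f <;> rfl

-- A's run is the left fold of pvCombine over the segment list (lockstep on EVERY input;
-- in the error cases both sides yield `seqs`).
set_option maxHeartbeats 2000000 in
lemma pvArun_eq_foldl (limit : Int) (fuel : Nat) (cs : List Char) (seqs : List String) :
    pvArun limit fuel cs seqs = (pvSegs limit fuel cs).foldl pvCombine seqs := by
  fun_induction pvArun limit fuel cs seqs
  all_goals rw [pvSegs.eq_def]
  all_goals simp_all [pvToken, pvSegs_nil, Function.comp_def]

-- the segment list is the option list of each recorded start
lemma pvSegs_eq_map (limit : Int) (fuel : Nat) (cs : List Char) :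
    pvSegs limit fuel cs = (pvStarts limit fuel cs).map (pvOptsOf limit) := by
  fun_induction pvSegs limit fuel cs
  all_goals rw [pvStarts.eq_def]
  all_goals simp_all [pvOptsOf]

-- left fold of an associative unital operation = accumulator combined with the right fold
lemma foldl_combine_eq_foldr (L : List (List String)) (seqs : List String) :
    L.foldl pvCombine seqs = pvCombine seqs (L.foldr pvCombine [""]) := by
  induction L generalizing seqs with
  | nil => simp
  | cons o L ih => simp [List.foldl_cons, List.foldr_cons, ih, pvCombine_assoc]

-- B's backward fold over the starts = the right fold of pvCombine over their option lists
lemma foldr_match_eq (limit : Int) (L : List (List Char)) :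
    L.foldr (fun s tails => match pvToken limit s with
      | some (opts, _) => pvCombine opts tails
      | none => tails) [""] = (L.map (pvOptsOf limit)).foldr pvCombine [""] := by
  induction L with
  | nil => rfl
  | cons s L ih =>
    simp only [List.foldr_cons, List.map_cons, ih, pvOptsOf]
    cases h : pvToken limit s with
    | none => simp
    | some p => rfl

-- ===== VERDICT (by name: the statement is the Claim_ definition above) =====
theorem generate_sequences_from_regex_spec : Claim_equal_generate_sequences_from_regex := by
  intro regex limit _ _
  unfold Spec_generate_sequences_from_regex generate_sequences_from_regex generate_sequences_from_regex_alt
  rw [pvArun_eq_foldl, foldl_combine_eq_foldr, pvCombine_nil_left, pvSegs_eq_map, foldr_match_eq]
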